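-- pv_equiv track=rewrite | github.com/AsterW/2017A2CS | Ch25/recursion_1.py | countHi2
-- ===== SOURCE A (Python) =====
-- def countHi2(n):
--     if len(n) == 0:
--         return 0
--     if n[0] == "x":
--         if n[1:3] == "hi":
--             return 0 + countHi2(n[3:])
--     if n[0:2] == "hi":
--             return 1 + countHi2(n[2:])
--     return countHi2(n[1:])
-- ===== SOURCE B (Python) =====
-- def countHi2(n):
--     # total non-overlapping 'hi' occurrences minus those preceded by 'x'
--     return n.count('hi') - n.count('xhi')
-- ===== Notes on version B (the rewrite author's own statement) =====
-- stated objective: simpler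
-- what changed: Replaces the character-by-character recursion with a closed-form expression: count of 'hi' minus count of 'xhi' via two str.count scans and one subtraction.
import Mathlib
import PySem

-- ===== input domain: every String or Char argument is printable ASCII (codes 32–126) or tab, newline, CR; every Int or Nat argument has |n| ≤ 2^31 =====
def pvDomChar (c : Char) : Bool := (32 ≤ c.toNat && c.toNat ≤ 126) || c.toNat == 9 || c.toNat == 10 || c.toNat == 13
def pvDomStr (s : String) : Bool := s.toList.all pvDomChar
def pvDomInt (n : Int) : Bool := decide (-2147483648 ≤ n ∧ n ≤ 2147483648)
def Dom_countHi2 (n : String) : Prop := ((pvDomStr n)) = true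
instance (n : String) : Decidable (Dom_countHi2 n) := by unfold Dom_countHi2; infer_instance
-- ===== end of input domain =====

-- B replaces A's character-by-character recursion by count('hi') - count('xhi'): simpler, no recursion.

-- ===== PORT A =====
-- A's recursion, transliterated on the code points (PySem convention: strings as List Char).
def countHi2Go : List Char → Int
  | [] => 0
  | c :: t =>
    if c = 'x' ∧ PySem.List.slice (c :: t) (some 1) (some 3) = ['h', 'i'] then
      0 + countHi2Go (PySem.List.slice (c :: t) (some 3) none)
    else if PySem.List.slice (c :: t) (some 0) (some 2) = ['h', 'i'] then
      1 + countHi2Go (PySem.List.slice (c :: t) (some 2) none)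
    else
      countHi2Go (PySem.List.slice (c :: t) (some 1) none)
  termination_by l => l.length
  decreasing_by
    · rw [PySem.List.slice_from]
      · simp
      · norm_num
    · rw [PySem.List.slice_from]
      · simp
      · norm_num
    · rw [PySem.List.slice_from]
      · simp
      · norm_num

def countHi2 (n : String) : Int := countHi2Go n.toList

-- ===== PORT B =====
def countHi2_alt (n : String) : Int :=
  (PySem.Str.count n "hi" : Int) - (PySem.Str.count n "xhi" : Int)

-- ===== PRECONDITION & SPEC =====
def Spec_countHi2 (n : String) (out : Int) : Prop := out = countHi2_alt n
instance (n : String) (out : Int) : Decidable (Spec_countHi2 n out) := by unfold Spec_countHi2; infer_instance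

-- ===== CLAIM (what is proved, stated in full; the proofs are below) =====
def Claim_equal_countHi2 : Prop := ∀ (n : String), Dom_countHi2 n → Spec_countHi2 n (countHi2 n)

-- ===== LEMMAS AND PROOFS =====

-- count.go only reads the accumulator additively
theorem pv_go_acc (sub : List Char) :
    ∀ (fuel : Nat) (l : List Char) (acc : Nat),
      PySem.Chars.count.go sub fuel l acc = acc + PySem.Chars.count.go sub fuel l 0 := by
  intro fuel
  induction fuel with
  | zero => intro l acc; simp [PySem.Chars.count.go]
  | succ f ih =>
    intro l acc
    cases l with
    | nil => simp [PySem.Chars.count.go]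
    | cons h t =>
      simp only [PySem.Chars.count.go]
      split
      · rw [ih _ (acc + 1), ih _ (0 + 1)]; omega
      · rw [ih t acc]

-- fuel irrelevance above the list length
theorem pv_go_fuel (sub : List Char) (hsub : sub ≠ []) :
    ∀ (f₁ f₂ : Nat) (l : List Char) (acc : Nat), l.length ≤ f₁ → l.length ≤ f₂ →
      PySem.Chars.count.go sub f₁ l acc = PySem.Chars.count.go sub f₂ l acc := by
  intro f₁
  induction f₁ with
  | zero =>
    intro f₂ l acc h1 _
    have : l = [] := List.length_eq_zero_iff.mp (Nat.le_zero.mp h1)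
    subst this
    cases f₂ <;> simp [PySem.Chars.count.go]
  | succ f ih =>
    intro f₂ l acc h1 h2
    cases l with
    | nil => cases f₂ <;> simp [PySem.Chars.count.go]
    | cons h t =>
      cases f₂ with
      | zero => simp at h2
      | succ g =>
        have hs1 : 1 ≤ sub.length := by
          cases sub with
          | nil => exact absurd rfl hsub
          | cons a s => simp
        simp only [List.length_cons] at h1 h2
        simp only [PySem.Chars.count.go]
        split
        · apply ih <;> simp only [List.length_drop, List.length_cons] <;> omega
        · apply ih <;> omega

-- step lemma: sub is a prefix
theorem pv_count_pos (sub l : List Char) (hsub : sub ≠ [])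
    (hp : sub.isPrefixOf l = true) :
    PySem.Chars.count l sub = PySem.Chars.count (l.drop sub.length) sub + 1 := by
  have hne : sub.isEmpty = false := by
    cases sub with
    | nil => exact absurd rfl hsub
    | cons a s => rfl
  have hs1 : 1 ≤ sub.length := by
    cases sub with
    | nil => exact absurd rfl hsub
    | cons a s => simp
  cases l with
  | nil =>
    exfalso
    cases sub with
    | nil => exact hsub rfl
    | cons a s => simp [List.isPrefixOf] at hp
  | cons h t =>
    simp only [PySem.Chars.count, hne, Bool.false_eq_true, if_false]
    simp only [List.length_cons, PySem.Chars.count.go, hp, if_pos]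
    rw [pv_go_acc]
    rw [pv_go_fuel sub hsub t.length ((h :: t).drop sub.length).length
        ((h :: t).drop sub.length) 0
        (by simp only [List.length_drop, List.length_cons]; omega) le_rfl]
    omega

-- step lemma: sub is not a prefix
theorem pv_count_neg (sub : List Char) (h : Char) (t : List Char) (hsub : sub ≠ [])
    (hp : sub.isPrefixOf (h :: t) = false) :
    PySem.Chars.count (h :: t) sub = PySem.Chars.count t sub := by
  have hne : sub.isEmpty = false := by
    cases sub with
    | nil => exact absurd rfl hsub
    | cons a s => rfl
  simp only [PySem.Chars.count, hne, Bool.false_eq_true, if_false]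
  simp only [List.length_cons, PySem.Chars.count.go, hp, Bool.false_eq_true, if_false]

-- main lemma on code points
theorem pv_main (l : List Char) :
    countHi2Go l = (PySem.Chars.count l ['h', 'i'] : Int) - (PySem.Chars.count l ['x', 'h', 'i'] : Int) := by
  fun_induction countHi2Go l with
  | case1 => simp [PySem.Chars.count, PySem.Chars.count.go]
  | case2 c t h ih =>
    obtain ⟨hc, hs⟩ := h
    subst hc
    rw [show PySem.List.slice ('x' :: t) (some 1) (some 3) = t.take 2 by simp [pysem]] at hs
    cases t with
    | nil => simp at hs
    | cons a t' =>
      cases t' with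
      | nil => simp at hs
      | cons b t₂ =>
        simp only [List.take, List.cons.injEq, and_true] at hs
        obtain ⟨ha, hb⟩ := hs
        subst ha; subst hb
        rw [show PySem.List.slice ('x' :: 'h' :: 'i' :: t₂) (some 3) none = t₂ by simp [pysem]] at ih ⊢
        rw [pv_count_neg ['h', 'i'] 'x' _ (by decide) (by simp [List.isPrefixOf])]
        rw [pv_count_pos ['h', 'i'] ('h' :: 'i' :: t₂) (by decide) (by simp [List.isPrefixOf])]
        rw [pv_count_pos ['x', 'h', 'i'] ('x' :: 'h' :: 'i' :: t₂) (by decide) (by simp [List.isPrefixOf])]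
        simp only [List.length_cons, List.length_nil, List.drop]
        push_cast
        omega
  | case3 c t h1 h2 ih =>
    rw [show PySem.List.slice (c :: t) (some 0) (some 2) = c :: t.take 1 by simp [pysem]] at h2
    cases t with
    | nil => simp at h2
    | cons a t' =>
      simp only [List.take, List.cons.injEq, and_true] at h2
      obtain ⟨hc, ha⟩ := h2
      subst hc; subst ha
      rw [show PySem.List.slice ('h' :: 'i' :: t') (some 2) none = t' by simp [pysem]] at ih ⊢
      rw [pv_count_pos ['h', 'i'] ('h' :: 'i' :: t') (by decide) (by simp [List.isPrefixOf])]
      rw [pv_count_neg ['x', 'h', 'i'] 'h' _ (by decide) (by simp [List.isPrefixOf])]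
      rw [pv_count_neg ['x', 'h', 'i'] 'i' _ (by decide) (by simp [List.isPrefixOf])]
      simp only [List.length_cons, List.length_nil, List.drop]
      push_cast
      omega
  | case4 c t h1 h2 ih =>
    rw [show PySem.List.slice (c :: t) (some 0) (some 2) = c :: t.take 1 by simp [pysem]] at h2
    rw [show PySem.List.slice (c :: t) (some 1) (some 3) = t.take 2 by simp [pysem]] at h1
    rw [show PySem.List.slice (c :: t) (some 1) none = t by simp [pysem]] at ih ⊢
    have hhi : List.isPrefixOf ['h', 'i'] (c :: t) = false := by
      rw [Bool.eq_false_iff]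
      intro hp
      rw [List.isPrefixOf_iff_prefix] at hp
      obtain ⟨r, hr⟩ := hp
      simp only [List.cons_append, List.nil_append, List.cons.injEq] at hr
      obtain ⟨hc, ht⟩ := hr
      subst hc; subst ht
      exact h2 (by simp)
    have hxhi : List.isPrefixOf ['x', 'h', 'i'] (c :: t) = false := by
      rw [Bool.eq_false_iff]
      intro hp
      rw [List.isPrefixOf_iff_prefix] at hp
      obtain ⟨r, hr⟩ := hp
      simp only [List.cons_append, List.nil_append, List.cons.injEq] at hr
      obtain ⟨hc, ht⟩ := hr
      subst hc; subst ht
      exact h1 ⟨rfl, by simp⟩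
    rw [pv_count_neg ['h', 'i'] c t (by decide) hhi,
        pv_count_neg ['x', 'h', 'i'] c t (by decide) hxhi]
    exact ih

-- ===== VERDICT (by name: the statement is the Claim_ definition above) =====
theorem countHi2_spec : Claim_equal_countHi2 := by
  intro n _
  unfold Spec_countHi2 countHi2 countHi2_alt PySem.Str.count
  have : ("hi" : String).toList = ['h', 'i'] := rfl
  rw [this]
  have : ("xhi" : String).toList = ['x', 'h', 'i'] := rfl
  rw [this]
  exact pv_main n.toList
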